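-- pv_equiv track=rewrite | github.com/XemaFrias/Universidad | Heurística/Práctica TSP/Constraint Programming/schedule.py | maximumSlotsSubject
-- ===== SOURCE A (Python) =====
-- def maximumSlotsSubject(*slots):
-- 	math = 0
-- 	english = 0
-- 	natural  = 0
-- 	social  = 0
-- 	spanish  = 0
-- 	physical  = 0
-- 	for x in slots:
-- 		if x == 'Natural Science':
-- 			natural+= 1
-- 		elif x == 'Social Science':
-- 			social+= 1
-- 		elif x == 'Spanish L.':
-- 			spanish+= 1
-- 		elif x == 'Mathematics':
-- 			math+= 1
-- 		elif x == 'English':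
-- 			english+= 1
-- 		else:
-- 			physical+= 1
-- 	return natural == 2 and social == 2 and spanish == 2 and math == 2 and english == 2 and physical == 1
-- ===== SOURCE B (Python) =====
-- NAMED = ('English', 'Mathematics', 'Natural Science', 'Social Science', 'Spanish L.')
--
-- def maximumSlotsSubject(*slots):
-- 	named = sorted(x for x in slots if x in NAMED)
-- 	return len(slots) - len(named) == 1 and named == sorted(NAMED * 2)
-- ===== Notes on version B (the rewrite author's own statement) =====
-- stated objective: alternative
-- what changed: Replaces the six-counter branching loop with a partition-and-sort strategy: filter out the named-subject slots, sort them, compare against the sorted multiset of the five subjects taken twice, and require exactly one leftover slot.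
import Mathlib
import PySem

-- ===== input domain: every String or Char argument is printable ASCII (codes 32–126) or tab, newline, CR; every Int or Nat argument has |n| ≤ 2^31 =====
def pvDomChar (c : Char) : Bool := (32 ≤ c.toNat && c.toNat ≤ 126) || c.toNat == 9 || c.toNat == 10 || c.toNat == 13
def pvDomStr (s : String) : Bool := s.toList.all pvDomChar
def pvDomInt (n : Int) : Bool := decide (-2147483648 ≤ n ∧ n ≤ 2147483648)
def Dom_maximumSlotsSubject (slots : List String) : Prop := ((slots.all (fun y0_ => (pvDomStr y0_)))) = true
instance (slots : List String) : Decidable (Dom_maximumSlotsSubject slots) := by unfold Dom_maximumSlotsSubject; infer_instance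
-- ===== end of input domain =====

-- B replaces A's six-counter branching loop by partition-and-sort: sort the named-subject
-- slots and compare with the sorted expected multiset, with exactly one leftover slot
-- (objective: alternative).

-- ===== PORT A =====
-- the loop over slots, carrying the six counters (math, english, natural, social, spanish, physical)
def maximumSlotsSubject_loop : Int → Int → Int → Int → Int → Int → List String →
    Int × Int × Int × Int × Int × Int
  | m, e, n, s, p, ph, [] => (m, e, n, s, p, ph)
  | m, e, n, s, p, ph, x :: xs =>
    if x = "Natural Science" then maximumSlotsSubject_loop m e (n + 1) s p ph xs
    else if x = "Social Science" then maximumSlotsSubject_loop m e n (s + 1) p ph xs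
    else if x = "Spanish L." then maximumSlotsSubject_loop m e n s (p + 1) ph xs
    else if x = "Mathematics" then maximumSlotsSubject_loop (m + 1) e n s p ph xs
    else if x = "English" then maximumSlotsSubject_loop m (e + 1) n s p ph xs
    else maximumSlotsSubject_loop m e n s p (ph + 1) xs

def maximumSlotsSubject (slots : List String) : Bool :=
  let r := maximumSlotsSubject_loop 0 0 0 0 0 0 slots
  r.2.2.1 == 2 && r.2.2.2.1 == 2 && r.2.2.2.2.1 == 2 && r.1 == 2 && r.2.1 == 2 && r.2.2.2.2.2 == 1

-- ===== PORT B =====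
-- the module-level NAMED tuple of Source B
def pvNAMED : List String :=
  ["English", "Mathematics", "Natural Science", "Social Science", "Spanish L."]

def maximumSlotsSubject_alt (slots : List String) : Bool :=
  let named := PySem.List.sorted (slots.filter (fun x => pvNAMED.contains x)) (fun x => x) false
  ((slots.length : Int) - (named.length : Int) == 1)
    && named == PySem.List.sorted (pvNAMED ++ pvNAMED) (fun x => x) false

-- ===== PRECONDITION & SPEC =====
def Spec_maximumSlotsSubject (slots : List String) (out : Bool) : Prop := out = maximumSlotsSubject_alt slots
instance (slots : List String) (out : Bool) : Decidable (Spec_maximumSlotsSubject slots out) := by unfold Spec_maximumSlotsSubject; infer_instance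

-- ===== CLAIM (what is proved, stated in full; the proofs are below) =====
def Claim_equal_maximumSlotsSubject : Prop := ∀ (slots : List String), Dom_maximumSlotsSubject slots → Spec_maximumSlotsSubject slots (maximumSlotsSubject slots)

-- ===== LEMMAS AND PROOFS =====

-- the loop adds each string's count (with the else branch counting everything unmatched) to the accumulators
theorem maximumSlotsSubject_loop_eq (xs : List String) :
    ∀ (m e n s p ph : Int),
    maximumSlotsSubject_loop m e n s p ph xs =
      (m + xs.count "Mathematics", e + xs.count "English", n + xs.count "Natural Science",
       s + xs.count "Social Science", p + xs.count "Spanish L.",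
       ph + (xs.length : Int) - xs.count "Mathematics" - xs.count "English"
          - xs.count "Natural Science" - xs.count "Social Science" - xs.count "Spanish L.") := by
  induction xs with
  | nil => intro m e n s p ph; simp [maximumSlotsSubject_loop]
  | cons x xs ih =>
    intro m e n s p ph
    simp only [maximumSlotsSubject_loop, List.count_cons, List.length_cons]
    split_ifs with h1 h2 h3 h4 h5 <;>
      simp_all <;> omega

-- the filtered named-subject slots have length = sum of the five counts
theorem length_filter_named (xs : List String) :
    (xs.filter (fun x => pvNAMED.contains x)).length =
      xs.count "English" + xs.count "Mathematics" + xs.count "Natural Science"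
        + xs.count "Social Science" + xs.count "Spanish L." := by
  induction xs with
  | nil => simp
  | cons x xs ih =>
    simp only [List.filter_cons, List.count_cons, pvNAMED, List.contains_cons,
      List.contains_nil] at *
    by_cases h1 : x = "English" <;> by_cases h2 : x = "Mathematics" <;>
      by_cases h3 : x = "Natural Science" <;> by_cases h4 : x = "Social Science" <;>
      by_cases h5 : x = "Spanish L." <;> simp_all <;> omega

-- the filtered slots are a permutation of NAMED ++ NAMED iff each named subject appears twice
theorem filter_perm_iff (xs : List String) :
    (xs.filter (fun x => pvNAMED.contains x)).Perm (pvNAMED ++ pvNAMED) ↔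
      (xs.count "English" = 2 ∧ xs.count "Mathematics" = 2 ∧ xs.count "Natural Science" = 2
        ∧ xs.count "Social Science" = 2 ∧ xs.count "Spanish L." = 2) := by
  rw [List.perm_iff_count]
  constructor
  · intro h
    refine ⟨?_, ?_, ?_, ?_, ?_⟩ <;>
      [have := h "English"; have := h "Mathematics"; have := h "Natural Science";
       have := h "Social Science"; have := h "Spanish L."] <;>
      simp [List.count_filter, pvNAMED] at this <;> omega
  · rintro ⟨h1, h2, h3, h4, h5⟩ a
    by_cases ha : a ∈ pvNAMED
    · simp only [pvNAMED, List.mem_cons, List.not_mem_nil, or_false] at ha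
      rcases ha with rfl | rfl | rfl | rfl | rfl <;>
        simp [List.count_filter, pvNAMED, h1, h2, h3, h4, h5]
    · have he : a ∉ pvNAMED ++ pvNAMED := by simp [ha]
      rw [List.count_eq_zero_of_not_mem he, List.count_eq_zero]
      intro hmem
      exact ha (by simpa using (List.mem_filter.mp hmem).2)

-- ===== VERDICT (by name: the statement is the Claim_ definition above) =====
theorem maximumSlotsSubject_spec : Claim_equal_maximumSlotsSubject := by
  intro slots _
  unfold Spec_maximumSlotsSubject maximumSlotsSubject maximumSlotsSubject_alt
  simp only [maximumSlotsSubject_loop_eq, zero_add]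
  rw [Bool.eq_iff_iff]
  simp only [Bool.and_eq_true, beq_iff_eq]
  rw [PySem.List.sorted_id_eq_sorted_id_iff_perm, filter_perm_iff,
    PySem.List.length_sorted, length_filter_named]
  push_cast
  omega
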